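-- pv_equiv track=rewrite | github.com/stokuj/Exercises | mooc-programming-26/part06-05_course_grading_part_2/src/course_grading_part_2.py | calc_grade
-- ===== SOURCE A (Python) =====
-- def calc_grade(exercises: dict, exam_points: dict) -> dict:
--     grades = {}
--     for student in exercises:
--         exe_points = exercises[student] // 4
--         total_points = exe_points + exam_points[student]
--
--         grade = 0
--         thresholds = [(28, 5), (24, 4), (21, 3), (18, 2), (15, 1)]
--
--         for limit, val in thresholds:
--             if total_points >= limit:
--                 grade = val
--                 break
--
--         grades[student] = grade
--     return grades
-- ===== SOURCE B (Python) =====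
-- def calc_grade(exercises: dict, exam_points: dict) -> dict:
--     # grade = number of ascending boundaries not exceeding the total (= bisect index)
--     return {
--         student: sum(points // 4 + exam_points[student] >= b for b in (15, 18, 21, 24, 28))
--         for student, points in exercises.items()
--     }
-- ===== Notes on version B (the rewrite author's own statement) =====
-- stated objective: simpler
-- what changed: Replaces the descending threshold scan with break by counting the ascending boundaries that the total reaches (the bisect index, written as a sum of comparisons) and builds the result as a dict comprehension instead of an explicit loop with an accumulator.
import Mathlib
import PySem

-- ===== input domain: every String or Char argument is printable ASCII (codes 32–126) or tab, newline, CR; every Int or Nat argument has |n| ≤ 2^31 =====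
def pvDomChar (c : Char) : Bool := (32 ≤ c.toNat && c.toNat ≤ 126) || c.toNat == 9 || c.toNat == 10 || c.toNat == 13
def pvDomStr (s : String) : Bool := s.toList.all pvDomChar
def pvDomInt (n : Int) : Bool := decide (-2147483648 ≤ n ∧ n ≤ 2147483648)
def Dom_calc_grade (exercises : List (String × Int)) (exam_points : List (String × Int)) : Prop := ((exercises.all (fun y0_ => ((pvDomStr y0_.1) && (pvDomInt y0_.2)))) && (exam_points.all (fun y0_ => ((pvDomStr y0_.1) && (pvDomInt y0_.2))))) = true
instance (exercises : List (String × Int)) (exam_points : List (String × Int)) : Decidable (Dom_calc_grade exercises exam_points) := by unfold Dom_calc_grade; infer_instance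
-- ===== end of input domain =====

-- B replaces the descending break-scan over thresholds by counting the ascending
-- boundaries the total reaches (a dict comprehension instead of an explicit loop); same cost, simpler.

-- ===== PORT A =====
-- inner 'for limit, val in thresholds: if total >= limit: grade = val; break' with grade = 0 initially
def gradeScan : List (Int × Int) → Int → Int
  | [], _ => 0
  | (limit, val) :: rest, total => if limit ≤ total then val else gradeScan rest total

def calc_grade (exercises : List (String × Int)) (exam_points : List (String × Int)) : List (String × Int) :=
  (exercises.foldl (fun grades p =>
      -- exercises[student] and exam_points[student]; 'none' = KeyError, excluded by Pre_
      match (PySem.Dict.mk exercises).get? p.1, (PySem.Dict.mk exam_points).get? p.1 with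
      | some exe, some examp =>
          grades.insert p.1
            (gradeScan [(28, 5), (24, 4), (21, 3), (18, 2), (15, 1)] (PySem.Int.floordiv exe 4 + examp))
      | _, _ => grades)
    PySem.Dict.empty).items

-- ===== PORT B =====
def calc_grade_alt (exercises : List (String × Int)) (exam_points : List (String × Int)) : List (String × Int) :=
  (exercises.foldl (fun grades p =>
      -- exam_points[student]; 'none' = KeyError, excluded by Pre_
      match (PySem.Dict.mk exam_points).get? p.1 with
      | some examp =>
          grades.insert p.1
            ((([15, 18, 21, 24, 28].countP (fun b => decide (b ≤ PySem.Int.floordiv p.2 4 + examp)) : Nat) : Int))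
      | none => grades)
    PySem.Dict.empty).items

-- ===== PRECONDITION & SPEC =====
-- Pre_ excludes (a) inputs where exam_points lacks a student of exercises (A raises KeyError) and
-- (b) association lists whose exercises keys are duplicated, which do not represent a Python dict.
def Pre_calc_grade (exercises : List (String × Int)) (exam_points : List (String × Int)) : Prop :=
  (exercises.map (fun p => p.1.toList)).Nodup ∧
  ∀ p ∈ exercises, p.1.toList ∈ exam_points.map (fun q => q.1.toList)
instance (exercises : List (String × Int)) (exam_points : List (String × Int)) : Decidable (Pre_calc_grade exercises exam_points) := by unfold Pre_calc_grade; infer_instance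

def pvWitness_calc_grade : (List (String × Int)) × (List (String × Int)) :=
  ([("ada", 90), ("bob", 41)], [("ada", 10), ("bob", 12)])

def Spec_calc_grade (exercises : List (String × Int)) (exam_points : List (String × Int)) (out : List (String × Int)) : Prop := out = calc_grade_alt exercises exam_points
instance (exercises : List (String × Int)) (exam_points : List (String × Int)) (out : List (String × Int)) : Decidable (Spec_calc_grade exercises exam_points out) := by unfold Spec_calc_grade; infer_instance

-- ===== CLAIM (what is proved, stated in full; the proofs are below) =====
def Claim_equal_calc_grade : Prop := ∀ (exercises : List (String × Int)) (exam_points : List (String × Int)), Dom_calc_grade exercises exam_points → Pre_calc_grade exercises exam_points → Spec_calc_grade exercises exam_points (calc_grade exercises exam_points)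

-- ===== LEMMAS AND PROOFS =====

-- A's break-scan equals B's count of reached ascending boundaries
theorem gradeScan_eq_countP (t : Int) :
    gradeScan [(28, 5), (24, 4), (21, 3), (18, 2), (15, 1)] t
      = (([15, 18, 21, 24, 28].countP (fun b => decide (b ≤ t)) : Nat) : Int) := by
  by_cases h28 : 28 ≤ t <;> by_cases h24 : 24 ≤ t <;> by_cases h21 : 21 ≤ t <;>
    by_cases h18 : 18 ≤ t <;> by_cases h15 : 15 ≤ t <;>
    simp [gradeScan, List.countP, List.countP.go, h28, h24, h21, h18, h15] <;> omega

-- ===== VERDICT (by name: the statement is the Claim_ definition above) =====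
theorem calc_grade_spec : Claim_equal_calc_grade := by
  intro exercises exam_points _ hpre
  unfold Spec_calc_grade calc_grade calc_grade_alt
  refine congrArg PySem.Dict.items ?_
  apply PySem.List.foldl_congr_mem
  intro acc p hp
  have hnd : (exercises.map Prod.fst).Nodup := by
    have h := hpre.1
    rw [show exercises.map (fun p => p.1.toList)
          = (exercises.map Prod.fst).map String.toList from by simp [List.map_map]] at h
    exact h.of_map
  have hex : (PySem.Dict.mk exercises).get? p.1 = some p.2 := by
    apply PySem.Dict.get?_of_mem_items
    · exact hp
    · simpa [PySem.Dict.keys_mk] using hnd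
  have hkey : p.1 ∈ (PySem.Dict.mk exam_points).keys := by
    obtain ⟨q, hq, he⟩ := List.mem_map.mp (hpre.2 p hp)
    have hq1 : q.1 = p.1 := String.toList_inj.mp he
    simp only [PySem.Dict.keys_mk, List.mem_map]
    exact ⟨q, hq, hq1⟩
  have hc : (PySem.Dict.mk exam_points).contains p.1 = true := by
    rw [PySem.Dict.contains_iff_mem_keys]; exact hkey
  rw [PySem.Dict.contains_eq_isSome_get?] at hc
  obtain ⟨examp, hexam⟩ := Option.isSome_iff_exists.mp hc
  simp [hex, hexam, gradeScan_eq_countP]
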